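-- pv_equiv track=rewrite | github.com/besm6/monitor80-re | matching/compare_shifted.py | best_offset_bruteforce
-- ===== SOURCE A (Python) =====
-- def best_offset_bruteforce(A, B):
--     """Simple O(N·M) version – used only if NumPy is missing."""
--     N, M = len(A), len(B)
--     wild = sum(1 for x in B if x == '*')
--     best_off = 0
--     best_match = -1
--     best_zeros = -1
--     for off in range(N - M + 1):
--         match = wild
--         zeros = 0
--         for i in range(M):
--             if B[i] != '*' and B[i] == A[off + i]:
--                 match += 1
--                 if B[i] == ' 0000000000000000':
--                     zeros += 1
--         if match > best_match:
--             best_match = match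
--             best_zeros = zeros
--             best_off = off
--     return best_off, best_match, best_zeros, wild
-- ===== SOURCE B (Python) =====
-- def _bisect_left(a, x, lo, hi):
--     """First index in a[lo:hi] (a sorted ascending) whose value is >= x."""
--     if lo >= hi:
--         return lo
--     mid = (lo + hi) // 2
--     if a[mid] < x:
--         return _bisect_left(a, x, mid + 1, hi)
--     return _bisect_left(a, x, lo, mid)
--
--
-- def best_offset_bruteforce(A, B):
--     """Histogram version: group A's positions by token, then for every non-wild
--     token of B visit only the positions that fall in the valid offset window."""
--     N, M = len(A), len(B)
--     ZERO = ' 0000000000000000'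
--     span = N - M
--     wild = B.count('*')
--     pos = {}
--     for p, a in enumerate(A):
--         pos.setdefault(a, []).append(p)
--     offs = []
--     zoffs = []
--     for i, b in enumerate(B):
--         if b != '*':
--             ps = pos.get(b, [])
--             lo = _bisect_left(ps, i, 0, len(ps))
--             hi = _bisect_left(ps, i + span + 1, 0, len(ps))
--             for p in ps[lo:hi]:
--                 off = p - i
--                 offs.append(off)
--                 if b == ZERO:
--                     zoffs.append(off)
--     hist = {}
--     for off in offs:
--         hist[off] = hist.get(off, 0) + 1
--     zhist = {}
--     for off in zoffs:
--         zhist[off] = zhist.get(off, 0) + 1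
--     best_off = 0
--     best_match = -1
--     best_zeros = -1
--     for off in range(N - M + 1):
--         m = wild + hist.get(off, 0)
--         if m > best_match:
--             best_off, best_match, best_zeros = off, m, zhist.get(off, 0)
--     return best_off, best_match, best_zeros, wild
-- ===== Notes on version B (the rewrite author's own statement) =====
-- stated objective: alternative
-- what changed: Replaces A's nested offset-by-index rescan with a grouping pass: A's positions are bucketed by token, each non-wild token of B contributes its window-restricted (binary-searched) matching positions to per-offset match/zero histograms, and a final linear scan over offsets picks the first maximum exactly as A does.
import Mathlib
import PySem

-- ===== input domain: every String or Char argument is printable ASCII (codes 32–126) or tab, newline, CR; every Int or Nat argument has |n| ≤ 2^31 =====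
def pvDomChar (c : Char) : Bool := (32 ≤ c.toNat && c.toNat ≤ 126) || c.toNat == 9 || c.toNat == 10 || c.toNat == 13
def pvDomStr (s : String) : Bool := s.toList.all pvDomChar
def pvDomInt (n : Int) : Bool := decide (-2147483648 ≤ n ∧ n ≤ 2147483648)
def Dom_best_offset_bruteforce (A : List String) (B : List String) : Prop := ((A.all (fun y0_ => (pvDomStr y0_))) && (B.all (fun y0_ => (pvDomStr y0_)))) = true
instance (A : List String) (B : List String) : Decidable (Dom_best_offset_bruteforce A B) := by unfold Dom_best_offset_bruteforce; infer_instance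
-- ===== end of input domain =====

-- Alternative algorithm: instead of A's per-offset index rescan, B groups A's positions per token
-- and builds per-offset match histograms from the window-restricted matching (token, position) pairs.

-- ===== PORT A =====
def best_offset_bruteforce (A : List String) (B : List String) : Int × Int × Int × Int :=
  let N : Int := PySem.List.len A
  let M : Int := PySem.List.len B
  let wild : Int := B.foldl (fun acc x => if x = "*" then acc + 1 else acc) 0
  let st :=
    (PySem.List.pyRange 0 (N - M + 1)).foldl
      (fun (st : Int × Int × Int) off =>
        let mz :=
          (PySem.List.pyRange 0 M).foldl
            (fun (mz : Int × Int) i =>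
              if PySem.List.pyGetD B i "" ≠ "*" ∧ PySem.List.pyGetD B i "" = PySem.List.pyGetD A (off + i) "" then
                (mz.1 + 1, if PySem.List.pyGetD B i "" = " 0000000000000000" then mz.2 + 1 else mz.2)
              else mz)
            (wild, 0)
        if mz.1 > st.2.1 then (off, mz.1, mz.2) else st)
      (0, -1, -1)
  (st.1, st.2.1, st.2.2, wild)

-- ===== PORT B =====
-- termination fact for the hand-written binary search below (cited by its decreasing_by)
theorem pyBisectLeft_mid_lt {lo hi : Int} (h : lo < hi) :
    PySem.Int.floordiv (lo + hi) 2 < hi := by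
  rw [PySem.Int.floordiv_lt_iff_lt_mul (by omega)]
  omega

-- port of Source B's _bisect_left (hand-written recursive binary search)
def pyBisectLeft (a : List Int) (x : Int) (lo hi : Int) : Int :=
  if h : lo < hi then
    let mid := PySem.Int.floordiv (lo + hi) 2
    if PySem.List.pyGetD a mid 0 < x then pyBisectLeft a x (mid + 1) hi
    else pyBisectLeft a x lo mid
  else lo
termination_by (hi - lo).toNat
decreasing_by
  · have hb := PySem.Int.floordiv_two_mid_bounds (le_of_lt h)
    have := pyBisectLeft_mid_lt h
    omega
  · have hb := PySem.Int.floordiv_two_mid_bounds (le_of_lt h)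
    have := pyBisectLeft_mid_lt h
    omega

def best_offset_bruteforce_alt (A : List String) (B : List String) : Int × Int × Int × Int :=
  let N : Int := PySem.List.len A
  let M : Int := PySem.List.len B
  let span : Int := N - M
  let wild : Int := (PySem.List.count B "*" : Int)
  let pos : PySem.Dict String (List Int) :=
    (PySem.List.enumerate A).foldl (fun d pa => d.modify pa.2 [] (fun l => l ++ [pa.1])) PySem.Dict.empty
  let oz : List Int × List Int :=
    (PySem.List.enumerate B).foldl
      (fun (acc : List Int × List Int) ib =>
        if ib.2 ≠ "*" then
          let ps := pos.getD ib.2 []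
          let lo := pyBisectLeft ps ib.1 0 (PySem.List.len ps)
          let hi := pyBisectLeft ps (ib.1 + span + 1) 0 (PySem.List.len ps)
          (PySem.List.slice ps (some lo) (some hi)).foldl
            (fun (acc : List Int × List Int) p =>
              let off := p - ib.1
              (acc.1 ++ [off], if ib.2 = " 0000000000000000" then acc.2 ++ [off] else acc.2))
            acc
        else acc)
      ([], [])
  let hist : PySem.Dict Int Int := oz.1.foldl (fun d off => d.modify off 0 (fun v => v + 1)) PySem.Dict.empty
  let zhist : PySem.Dict Int Int := oz.2.foldl (fun d off => d.modify off 0 (fun v => v + 1)) PySem.Dict.empty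
  let st :=
    (PySem.List.pyRange 0 (N - M + 1)).foldl
      (fun (st : Int × Int × Int) off =>
        let m := wild + hist.getD off 0
        if m > st.2.1 then (off, m, zhist.getD off 0) else st)
      (0, -1, -1)
  (st.1, st.2.1, st.2.2, wild)

-- ===== PRECONDITION & SPEC =====
def Spec_best_offset_bruteforce (A : List String) (B : List String) (out : Int × Int × Int × Int) : Prop := out = best_offset_bruteforce_alt A B
instance (A : List String) (B : List String) (out : Int × Int × Int × Int) : Decidable (Spec_best_offset_bruteforce A B out) := by unfold Spec_best_offset_bruteforce; infer_instance

-- ===== CLAIM (what is proved, stated in full; the proofs are below) =====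
def Claim_equal_best_offset_bruteforce : Prop := ∀ (A : List String) (B : List String), Dom_best_offset_bruteforce A B → Spec_best_offset_bruteforce A B (best_offset_bruteforce A B)

-- ===== LEMMAS AND PROOFS =====

-- A's "wild" counting fold equals Python's B.count('*').
theorem pv_wild_eq (B : List String) :
    B.foldl (fun acc x => if x = "*" then acc + 1 else acc) (0 : Int) = (PySem.List.count B "*" : Int) := by
  rw [PySem.List.foldl_congr_mem B _ (fun acc x => if (x == "*") = true then acc + 1 else acc) 0
      (by intro acc x _; simp)]
  rw [PySem.List.foldl_count_if]
  simp [PySem.List.count, List.count]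

-- A pair-state counting fold, characterised by two countP's.
theorem pv_pair_fold {α : Type} (P Q : α → Prop) [DecidablePred P] [DecidablePred Q]
    (l : List α) (m z : Int) :
    l.foldl (fun (mz : Int × Int) i => if P i then (mz.1 + 1, if Q i then mz.2 + 1 else mz.2) else mz) (m, z)
    = (m + (l.countP (fun i => decide (P i)) : Int), z + (l.countP (fun i => decide (P i ∧ Q i)) : Int)) := by
  induction l generalizing m z with
  | nil => simp
  | cons x xs ih =>
    simp only [List.foldl_cons, List.countP_cons]
    by_cases hp : P x
    · by_cases hq : Q x
      · simp only [hp, hq, and_self, decide_true, if_pos]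
        rw [ih]; simp only [Prod.mk.injEq]; constructor <;> push_cast <;> omega
      · have h2 : (decide (P x ∧ Q x)) = false := by simp [hq]
        simp only [hp, hq, h2, decide_true, if_pos, Bool.false_eq_true, if_false]
        rw [ih]; simp only [Prod.mk.injEq]
        constructor
        · omega
        · simp
    · have h1 : (decide (P x)) = false := by simp [hp]
      have h2 : (decide (P x ∧ Q x)) = false := by simp [hp]
      simp only [if_neg hp, h1, h2]
      rw [ih]; simp

-- Positions of token v in A, in order: what the grouping dict stores under v.
def pvPosOf (A : List String) (v : String) : List Int :=
  (PySem.List.pyRange 0 (PySem.List.len A)).filter (fun q => PySem.List.pyGetD A q "" == v)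

theorem pv_pos_spec (A : List String) (v : String) :
    ((PySem.List.enumerate A).foldl (fun d pa => d.modify pa.2 [] (fun l => l ++ [pa.1]))
        (PySem.Dict.empty : PySem.Dict String (List Int))).getD v []
    = pvPosOf A v := by
  have h : (PySem.List.enumerate A).foldl (fun d pa => d.modify pa.2 [] (fun l => l ++ [pa.1]))
        (PySem.Dict.empty : PySem.Dict String (List Int))
      = ((PySem.List.enumerate A).map (fun pa => (pa.2, pa.1))).foldl
          (fun d p => d.modify p.1 [] (fun l => l ++ [p.2])) PySem.Dict.empty := by
    rw [List.foldl_map]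
  rw [h, PySem.Dict.getD_foldl_modify_append]
  rw [PySem.List.enumerate_eq_map_pyRange A ""]
  simp only [List.map_map, List.filter_map, List.map_map]
  simp [pvPosOf, Function.comp_def]

theorem pv_nodup_posOf (A : List String) (v : String) : (pvPosOf A v).Nodup := by
  apply List.Nodup.filter
  have : PySem.List.pyRange 0 (PySem.List.len A) = List.map (fun k : Nat => (k : Int)) (List.range A.length) := by
    rw [show PySem.List.len A = ((A.length : Int)) from by simp [PySem.List.len]]
    exact PySem.List.pyRange_zero_natCast A.length
  rw [this]
  exact (List.nodup_range).map (fun a b h => by exact_mod_cast h)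

theorem pv_count_posOf (A : List String) (v : String) (q : Int) :
    List.count q (pvPosOf A v)
    = if 0 ≤ q ∧ q < PySem.List.len A ∧ PySem.List.pyGetD A q "" = v then 1 else 0 := by
  have hmem : q ∈ pvPosOf A v ↔ (0 ≤ q ∧ q < PySem.List.len A ∧ PySem.List.pyGetD A q "" = v) := by
    simp [pvPosOf, List.mem_filter, PySem.List.mem_pyRange_one, and_assoc]
  by_cases h : 0 ≤ q ∧ q < PySem.List.len A ∧ PySem.List.pyGetD A q "" = v
  · rw [if_pos h]
    exact List.count_eq_one_of_mem (pv_nodup_posOf A v) (hmem.mpr h)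
  · rw [if_neg h]
    exact List.count_eq_zero_of_not_mem (fun hm => h (hmem.mp hm))

theorem pv_countP_eq_of_split (a : List Int) (p : Int → Bool) (n : Nat) (hn : n ≤ a.length)
    (h1 : ∀ k, k < n → ∀ h : k < a.length, p a[k] = true)
    (h2 : ∀ k, n ≤ k → ∀ h : k < a.length, ¬ p a[k] = true) :
    a.countP p = n := by
  have hsplit : a.countP p = (a.take n).countP p + (a.drop n).countP p := by
    rw [← List.countP_append, List.take_append_drop]
  rw [hsplit]
  have ht : (a.take n).countP p = n := by
    have hlen : (a.take n).length = n := by simp [hn]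
    rw [List.countP_eq_length.mpr, hlen]
    intro x hx
    rw [List.mem_iff_getElem] at hx
    obtain ⟨i, hi, hxe⟩ := hx
    rw [hlen] at hi
    have hi' : i < a.length := lt_of_lt_of_le hi hn
    rw [List.getElem_take] at hxe
    rw [← hxe]
    exact h1 i hi hi'
  have hd : (a.drop n).countP p = 0 := by
    rw [List.countP_eq_zero]
    intro x hx
    rw [List.mem_iff_getElem] at hx
    obtain ⟨i, hi, hxe⟩ := hx
    rw [List.length_drop] at hi
    have hi' : n + i < a.length := by omega
    rw [List.getElem_drop] at hxe
    rw [← hxe]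
    exact h2 (n + i) (by omega) hi'
  omega

theorem pv_getD_lt {a : List Int} {k : Nat} (h : k < a.length) : a.getD k 0 = a[k] := by
  simp [List.getD_eq_getElem?_getD, List.getElem?_eq_getElem h]

theorem pyBisectLeft_spec (a : List Int) (x : Int) (hs : a.Pairwise (· ≤ ·)) :
    ∀ (n : Nat) (lo hi : Int), (hi - lo).toNat = n → 0 ≤ lo → lo ≤ hi → hi ≤ a.length →
    (∀ k : Nat, k < lo.toNat → ∀ h : k < a.length, a[k] < x) →
    (∀ k : Nat, hi.toNat ≤ k → ∀ h : k < a.length, ¬ a[k] < x) →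
    pyBisectLeft a x lo hi = ((a.countP (fun p => decide (p < x)) : Nat) : Int) := by
  intro n
  induction n using Nat.strong_induction_on with
  | _ n ih =>
    intro lo hi hn h0 hlh hhl h1 h2
    rw [pyBisectLeft]
    by_cases h : lo < hi
    · rw [dif_pos h]
      have hb := PySem.Int.floordiv_two_mid_bounds (le_of_lt h)
      have hmlt := pyBisectLeft_mid_lt h
      set mid := PySem.Int.floordiv (lo + hi) 2 with hmid
      have hmr : mid.toNat < a.length := by omega
      have hget : PySem.List.pyGetD a mid 0 = a[mid.toNat] := by
        rw [PySem.List.pyGetD_of_nonneg a 0 (by omega), pv_getD_lt hmr]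
      have hmono := List.pairwise_iff_getElem.mp hs
      by_cases hlt : PySem.List.pyGetD a mid 0 < x
      · rw [if_pos hlt]
        apply ih (hi - (mid + 1)).toNat (by omega) (mid + 1) hi (by rfl) (by omega) (by omega) hhl
        · intro k hk hka
          rcases Nat.lt_or_ge k mid.toNat with hkm | hkm
          · calc a[k] ≤ a[mid.toNat] := hmono k mid.toNat hka hmr hkm
              _ < x := by rw [← hget]; exact hlt
          · have : k = mid.toNat := by omega
            subst this
            rw [← hget]; exact hlt
        · exact h2
      · rw [if_neg hlt]
        apply ih (mid - lo).toNat (by omega) lo mid (by rfl) h0 (by omega) (by omega) h1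
        intro k hk hka hlt2
        have hax : ¬ a[mid.toNat] < x := by rw [← hget]; exact hlt
        rcases Nat.lt_or_ge mid.toNat k with hkm | hkm
        · exact absurd (lt_of_le_of_lt (hmono mid.toNat k hmr hka hkm) hlt2) hax
        · have : mid.toNat = k := by omega
          exact hax (this ▸ hlt2)
    · rw [dif_neg h]
      have hle : lo = hi := by omega
      subst hle
      have hc : a.countP (fun p => decide (p < x)) = lo.toNat := by
        apply pv_countP_eq_of_split
        · omega
        · intro k hk hka
          simpa using h1 k hk hka
        · intro k hk hka
          simpa using h2 k hk hka
      rw [hc]; omega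

theorem pv_take_countP (t : List Int) (y : Int) (hs : t.Pairwise (· ≤ ·)) :
    t.take (t.countP (fun p => decide (p < y))) = t.filter (fun p => decide (p < y)) := by
  induction t with
  | nil => simp
  | cons p t ih =>
    rw [List.pairwise_cons] at hs
    rw [List.countP_cons, List.filter_cons]
    by_cases hp : p < y
    · simp only [hp, decide_true, if_pos]
      rw [List.take_succ_cons, ih hs.2]
    · have hz : t.countP (fun p => decide (p < y)) = 0 := by
        rw [List.countP_eq_zero]
        intro q hq
        simp only [decide_eq_true_eq]
        exact fun hlt => hp (lt_of_le_of_lt (hs.1 q hq) hlt)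
      have hf : t.filter (fun p => decide (p < y)) = [] := by
        rw [List.filter_eq_nil_iff]
        intro q hq
        simp only [decide_eq_true_eq]
        exact fun hlt => hp (lt_of_le_of_lt (hs.1 q hq) hlt)
      simp [hp, hz, hf]

theorem pv_window (ps : List Int) (x y : Int) (hs : ps.Pairwise (· ≤ ·)) :
    List.take (ps.countP (fun p => decide (p < y)) - ps.countP (fun p => decide (p < x)))
      (List.drop (ps.countP (fun p => decide (p < x))) ps)
    = ps.filter (fun p => decide (x ≤ p ∧ p < y)) := by
  induction ps with
  | nil => simp
  | cons p t ih =>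
    rw [List.pairwise_cons] at hs
    obtain ⟨hall, ht⟩ := hs
    rw [List.countP_cons, List.countP_cons, List.filter_cons]
    by_cases hx : p < x
    · have hxy : ¬ (x ≤ p ∧ p < y) := fun hc => absurd hx (not_lt.mpr hc.1)
      simp only [hx, decide_true, if_pos, decide_eq_true_eq, hxy, if_neg, if_false]
      by_cases hy : p < y
      · simp only [hy, decide_true, if_pos]
        rw [Nat.add_sub_add_right, List.drop_succ_cons]
        exact ih ht
      · have hz : t.countP (fun p => decide (p < y)) = 0 := by
          rw [List.countP_eq_zero]
          intro q hq
          simp only [decide_eq_true_eq]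
          exact fun hlt => hy (lt_of_le_of_lt (hall q hq) hlt)
        have hf : t.filter (fun p => decide (x ≤ p ∧ p < y)) = [] := by
          rw [List.filter_eq_nil_iff]
          intro q hq
          simp only [decide_eq_true_eq]
          exact fun hc => hy (lt_of_le_of_lt (hall q hq) hc.2)
        simp [hy, hz, hf]
        intro a hq _
        exact le_trans (not_lt.mp hy) (hall a hq)
    · have hx' : x ≤ p := not_lt.mp hx
      have hzx : t.countP (fun p => decide (p < x)) = 0 := by
        rw [List.countP_eq_zero]
        intro q hq
        simp only [decide_eq_true_eq]
        exact fun hlt => hx (lt_of_le_of_lt (hall q hq) hlt)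
      by_cases hy : p < y
      · have hdy : (decide (p < y)) = true := decide_eq_true hy
        have hdx : (decide (p < x)) = false := decide_eq_false hx
        have hcond : (decide (x ≤ p ∧ p < y)) = true := decide_eq_true ⟨hx', hy⟩
        rw [hdy, hdx, hzx, hcond]
        simp only [if_true, Bool.false_eq_true, if_false, Nat.add_zero, List.drop_zero,
          Nat.sub_zero, List.take_succ_cons]
        rw [pv_take_countP t y ht]
        congr 1
        apply List.filter_congr
        intro q hq
        rw [decide_eq_decide]
        have := hall q hq
        constructor
        · exact fun h => ⟨le_trans hx' this, h⟩
        · exact fun h => h.2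
      · have hzy : t.countP (fun p => decide (p < y)) = 0 := by
          rw [List.countP_eq_zero]
          intro q hq
          simp only [decide_eq_true_eq]
          exact fun hlt => hy (lt_of_le_of_lt (hall q hq) hlt)
        have hf : t.filter (fun p => decide (x ≤ p ∧ p < y)) = [] := by
          rw [List.filter_eq_nil_iff]
          intro q hq
          simp only [decide_eq_true_eq]
          exact fun hc => hy (lt_of_le_of_lt (hall q hq) hc.2)
        have hcond : ¬ (x ≤ p ∧ p < y) := fun hc => hy hc.2
        simp [hx, hy, hzx, hzy, hf, hcond]
        intro a hq _
        exact le_trans (not_lt.mp hy) (hall a hq)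

theorem pv_sorted_posOf (A : List String) (v : String) : (pvPosOf A v).Pairwise (· ≤ ·) := by
  apply List.Pairwise.imp le_of_lt
  apply List.Pairwise.filter
  have : PySem.List.pyRange 0 (PySem.List.len A) = List.map (fun k : Nat => (k : Int)) (List.range A.length) := by
    rw [show PySem.List.len A = ((A.length : Int)) from by simp [PySem.List.len]]
    exact PySem.List.pyRange_zero_natCast A.length
  rw [this]
  exact List.Pairwise.map _ (fun a b h => by exact_mod_cast h) (List.pairwise_lt_range)

theorem pv_slice_window (A : List String) (v : String) (i span : Int) :
    PySem.List.slice (pvPosOf A v)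
      (some (pyBisectLeft (pvPosOf A v) i 0 (PySem.List.len (pvPosOf A v))))
      (some (pyBisectLeft (pvPosOf A v) (i + span + 1) 0 (PySem.List.len (pvPosOf A v))))
    = (pvPosOf A v).filter (fun p => decide (0 ≤ p - i ∧ p - i ≤ span)) := by
  have hs := pv_sorted_posOf A v
  have hlen : PySem.List.len (pvPosOf A v) = ((pvPosOf A v).length : Int) := by simp [PySem.List.len]
  have hb1 := pyBisectLeft_spec (pvPosOf A v) i hs ((pvPosOf A v).length) 0 (PySem.List.len (pvPosOf A v))
    (by omega) (by norm_num) (by omega) (by omega)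
    (by intro k hk _; omega) (by intro k hk h; omega)
  have hb2 := pyBisectLeft_spec (pvPosOf A v) (i + span + 1) hs ((pvPosOf A v).length) 0 (PySem.List.len (pvPosOf A v))
    (by omega) (by norm_num) (by omega) (by omega)
    (by intro k hk _; omega) (by intro k hk h; omega)
  rw [hb1, hb2, PySem.List.slice_natCast, pv_window _ i (i + span + 1) hs]
  apply List.filter_congr
  intro q _
  rw [decide_eq_decide]
  omega

-- What B's middle loop appends to offs (resp. zoffs) for one enumerated token of B.
def pvG (A : List String) (N M : Int) (ib : Int × String) : List Int :=
  if ib.2 = "*" then []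
  else ((pvPosOf A ib.2).filter (fun p => decide (0 ≤ p - ib.1 ∧ p - ib.1 ≤ N - M))).map (fun p => p - ib.1)

def pvGZ (A : List String) (N M : Int) (ib : Int × String) : List Int :=
  if ib.2 = "*" then []
  else if ib.2 = " 0000000000000000" then
    ((pvPosOf A ib.2).filter (fun p => decide (0 ≤ p - ib.1 ∧ p - ib.1 ≤ N - M))).map (fun p => p - ib.1)
  else []

theorem pv_inner_oz (i : Int) (c : Prop) [Decidable c] (ps : List Int) (acc : List Int × List Int) :
    ps.foldl
      (fun (acc : List Int × List Int) p =>
        (acc.1 ++ [p - i], if c then acc.2 ++ [p - i] else acc.2))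
      acc
    = (acc.1 ++ ps.map (fun p => p - i),
       if c then acc.2 ++ ps.map (fun p => p - i) else acc.2) := by
  induction ps generalizing acc with
  | nil => by_cases hc : c <;> simp [hc]
  | cons p ps ih =>
    rw [List.foldl_cons, ih]
    by_cases hc : c
    · rw [if_pos hc, if_pos hc, if_pos hc]
      simp only [List.map_cons, List.append_assoc, List.singleton_append]
    · rw [if_neg hc, if_neg hc, if_neg hc]
      simp only [List.map_cons, List.append_assoc, List.singleton_append]

theorem pv_oz_spec (A : List String) (N M : Int) (pos : PySem.Dict String (List Int))
    (hpos : ∀ v, pos.getD v [] = pvPosOf A v) (l : List (Int × String)) (acc : List Int × List Int) :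
    l.foldl
      (fun (acc : List Int × List Int) ib =>
        if ib.2 ≠ "*" then
          let ps := pos.getD ib.2 []
          let lo := pyBisectLeft ps ib.1 0 (PySem.List.len ps)
          let hi := pyBisectLeft ps (ib.1 + (N - M) + 1) 0 (PySem.List.len ps)
          (PySem.List.slice ps (some lo) (some hi)).foldl
            (fun (acc : List Int × List Int) p =>
              let off := p - ib.1
              (acc.1 ++ [off], if ib.2 = " 0000000000000000" then acc.2 ++ [off] else acc.2))
            acc
        else acc)
      acc
    = (acc.1 ++ l.flatMap (pvG A N M), acc.2 ++ l.flatMap (pvGZ A N M)) := by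
  induction l generalizing acc with
  | nil => simp
  | cons ib l ih =>
    rw [List.foldl_cons, List.flatMap_cons, List.flatMap_cons]
    by_cases hw : ib.2 = "*"
    · simp only [hw, ne_eq, not_true_eq_false, if_false, ih]
      simp [pvG, pvGZ, hw]
    · simp only [ne_eq, hw, not_false_eq_true, if_true]
      rw [hpos, pv_slice_window A ib.2 ib.1 (N - M),
        pv_inner_oz ib.1 (ib.2 = " 0000000000000000"), ih]
      by_cases hz : ib.2 = " 0000000000000000"
      · simp [pvG, pvGZ, hw, hz, List.append_assoc]
      · simp [pvG, pvGZ, hw, hz, List.append_assoc]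

theorem pv_sum_ite {α : Type} (P : α → Prop) [DecidablePred P] (l : List α) :
    (l.map (fun x => if P x then (1:Nat) else 0)).sum = l.countP (fun x => decide (P x)) := by
  induction l with
  | nil => simp
  | cons x xs ih => by_cases h : P x <;> simp [h, ih] <;> omega

theorem pv_count_g (A B : List String) (off j : Int)
    (h0 : 0 ≤ off) (h1 : off ≤ PySem.List.len A - PySem.List.len B)
    (hj : 0 ≤ j ∧ j < PySem.List.len B) :
    List.count off (pvG A (PySem.List.len A) (PySem.List.len B) (j, PySem.List.pyGetD B j ""))
    = if (PySem.List.pyGetD B j "" ≠ "*" ∧ PySem.List.pyGetD B j "" = PySem.List.pyGetD A (off + j) "") then 1 else 0 := by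
  have h1' : off ≤ (A.length : Int) - (B.length : Int) := by simpa [PySem.List.len] using h1
  have hj' : 0 ≤ j ∧ j < (B.length : Int) := by simpa [PySem.List.len] using hj
  set b := PySem.List.pyGetD B j "" with hb
  by_cases hw : b = "*"
  · simp [pvG, hw]
  · rw [pvG]
    simp only [hw, if_false]
    have hcm : List.count off
        (((pvPosOf A b).filter (fun p => decide (0 ≤ p - j ∧ p - j ≤ PySem.List.len A - PySem.List.len B))).map (fun p => p - j))
      = List.count (off + j)
        ((pvPosOf A b).filter (fun p => decide (0 ≤ p - j ∧ p - j ≤ PySem.List.len A - PySem.List.len B))) := by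
      rw [List.count, List.countP_map, List.count]
      apply List.countP_congr
      intro p _
      constructor <;> intro h
      · simp at h ⊢; omega
      · simp at h ⊢; omega
    rw [hcm, List.count_filter (by simp [PySem.List.len]; omega)]
    rw [pv_count_posOf]
    have hlt : off + j < PySem.List.len A := by simp [PySem.List.len]; omega
    have h0' : 0 ≤ off + j := by omega
    by_cases he : PySem.List.pyGetD A (off + j) "" = b
    · rw [if_pos ⟨h0', hlt, he⟩, if_pos ⟨hw, he.symm⟩]
    · rw [if_neg (by tauto), if_neg (by tauto)]

theorem pv_count_gz (A B : List String) (off j : Int)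
    (h0 : 0 ≤ off) (h1 : off ≤ PySem.List.len A - PySem.List.len B)
    (hj : 0 ≤ j ∧ j < PySem.List.len B) :
    List.count off (pvGZ A (PySem.List.len A) (PySem.List.len B) (j, PySem.List.pyGetD B j ""))
    = if ((PySem.List.pyGetD B j "" ≠ "*" ∧ PySem.List.pyGetD B j "" = PySem.List.pyGetD A (off + j) "") ∧ PySem.List.pyGetD B j "" = " 0000000000000000") then 1 else 0 := by
  set b := PySem.List.pyGetD B j "" with hb
  by_cases hw : b = "*"
  · simp [pvGZ, hw]
  · by_cases hz : b = " 0000000000000000"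
    · have h : pvGZ A (PySem.List.len A) (PySem.List.len B) (j, b)
          = pvG A (PySem.List.len A) (PySem.List.len B) (j, b) := by
        simp [pvG, pvGZ, hw, hz]
      rw [h, pv_count_g A B off j h0 h1 hj]
      by_cases he : b ≠ "*" ∧ b = PySem.List.pyGetD A (off + j) ""
      · rw [if_pos he, if_pos ⟨he, hz⟩]
      · rw [if_neg he, if_neg (by tauto)]
    · have hnil : pvGZ A (PySem.List.len A) (PySem.List.len B) (j, b) = [] := by
        simp [pvGZ, hw, hz]
      rw [hnil, if_neg (by tauto)]
      simp

theorem pv_count_offs (A B : List String) (off : Int)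
    (h0 : 0 ≤ off) (h1 : off ≤ PySem.List.len A - PySem.List.len B) :
    (List.count off ((PySem.List.enumerate B).flatMap (pvG A (PySem.List.len A) (PySem.List.len B))) : Int)
    = ((PySem.List.pyRange 0 (PySem.List.len B)).countP
        (fun i => decide (PySem.List.pyGetD B i "" ≠ "*" ∧ PySem.List.pyGetD B i "" = PySem.List.pyGetD A (off + i) "")) : Int) := by
  rw [List.count_flatMap]
  rw [PySem.List.enumerate_eq_map_pyRange B ""]
  rw [List.map_map]
  have hcongr : ∀ j ∈ PySem.List.pyRange 0 (PySem.List.len B),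
      ((List.count off ∘ pvG A (PySem.List.len A) (PySem.List.len B)) ∘ (fun j => (j, PySem.List.pyGetD B j ""))) j
      = (fun j => if (PySem.List.pyGetD B j "" ≠ "*" ∧ PySem.List.pyGetD B j "" = PySem.List.pyGetD A (off + j) "") then (1:Nat) else 0) j := by
    intro j hj
    rw [PySem.List.mem_pyRange_one] at hj
    exact pv_count_g A B off j h0 h1 hj
  rw [List.map_congr_left hcongr]
  rw [pv_sum_ite]

theorem pv_count_zoffs (A B : List String) (off : Int)
    (h0 : 0 ≤ off) (h1 : off ≤ PySem.List.len A - PySem.List.len B) :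
    (List.count off ((PySem.List.enumerate B).flatMap (pvGZ A (PySem.List.len A) (PySem.List.len B))) : Int)
    = ((PySem.List.pyRange 0 (PySem.List.len B)).countP
        (fun i => decide ((PySem.List.pyGetD B i "" ≠ "*" ∧ PySem.List.pyGetD B i "" = PySem.List.pyGetD A (off + i) "") ∧ PySem.List.pyGetD B i "" = " 0000000000000000")) : Int) := by
  rw [List.count_flatMap]
  rw [PySem.List.enumerate_eq_map_pyRange B ""]
  rw [List.map_map]
  have hcongr : ∀ j ∈ PySem.List.pyRange 0 (PySem.List.len B),
      ((List.count off ∘ pvGZ A (PySem.List.len A) (PySem.List.len B)) ∘ (fun j => (j, PySem.List.pyGetD B j ""))) j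
      = (fun j => if ((PySem.List.pyGetD B j "" ≠ "*" ∧ PySem.List.pyGetD B j "" = PySem.List.pyGetD A (off + j) "") ∧ PySem.List.pyGetD B j "" = " 0000000000000000") then (1:Nat) else 0) j := by
    intro j hj
    rw [PySem.List.mem_pyRange_one] at hj
    exact pv_count_gz A B off j h0 h1 hj
  rw [List.map_congr_left hcongr]
  rw [pv_sum_ite]

-- ===== VERDICT (by name: the statement is the Claim_ definition above) =====
theorem best_offset_bruteforce_spec : Claim_equal_best_offset_bruteforce := by
  intro A B _
  unfold Spec_best_offset_bruteforce
  simp only [best_offset_bruteforce, best_offset_bruteforce_alt]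
  rw [pv_wild_eq]
  rw [pv_oz_spec A (PySem.List.len A) (PySem.List.len B) _ (pv_pos_spec A) (PySem.List.enumerate B) ([], [])]
  simp only [List.nil_append]
  simp only [PySem.Dict.getD_foldl_modify_add_one, PySem.Dict.getD_empty]
  refine congrArg (fun st : Int × Int × Int => (st.1, st.2.1, st.2.2, (PySem.List.count B "*" : Int)))
    (PySem.List.foldl_congr_mem _ _ _ _ ?_)
  intro acc off hmem
  rw [PySem.List.mem_pyRange_one] at hmem
  have h0 : 0 ≤ off := hmem.1
  have h1 : off ≤ PySem.List.len A - PySem.List.len B := by omega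
  rw [pv_pair_fold (fun i => PySem.List.pyGetD B i "" ≠ "*" ∧ PySem.List.pyGetD B i "" = PySem.List.pyGetD A (off + i) "")
        (fun i => PySem.List.pyGetD B i "" = " 0000000000000000")]
  rw [pv_count_offs A B off h0 h1, pv_count_zoffs A B off h0 h1]
  simp only [zero_add]
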